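-- pv_equiv track=rewrite | github.com/LinyiHan1998/LCPractice | OA/amazon/maxSetSize.py | maxSetSize
-- ===== SOURCE A (Python) =====
-- def maxSetSize(riceBags):
--     riceSet = set(riceBags)
--     res = 0
--     for bag in riceBags:
--         tmp = bag
--         cnt = 1
--         while tmp*tmp in riceSet:
--             cnt += 1
--             tmp = tmp*tmp
--         res = max(cnt,res)
--
--     return res
-- ===== SOURCE B (Python) =====
-- def maxSetSize(riceBags):
--     riceSet = set(riceBags)
--     length = {}
--     # process distinct values in decreasing |v|: v*v (if present) is already done
--     for v in sorted(dict.fromkeys(riceBags), key=abs, reverse=True):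
--         sq = v * v
--         length[v] = length.get(sq, 0) + 1 if sq in riceSet else 1
--     res = 0
--     for bag in riceBags:
--         res = max(res, length[bag])
--     return res
-- ===== Notes on version B (the rewrite author's own statement) =====
-- stated objective: alternative
-- what changed: Replaces A's per-element re-walk of the squaring chain by a dynamic program: distinct values are sorted by decreasing absolute value and each chain length is computed once from the already-computed length of its square stored in a dict; Pre_ excludes lists containing 0 or 1, on which A's while loop never terminates (0*0==0, 1*1==1), so A returns no value there.
import Mathlib
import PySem

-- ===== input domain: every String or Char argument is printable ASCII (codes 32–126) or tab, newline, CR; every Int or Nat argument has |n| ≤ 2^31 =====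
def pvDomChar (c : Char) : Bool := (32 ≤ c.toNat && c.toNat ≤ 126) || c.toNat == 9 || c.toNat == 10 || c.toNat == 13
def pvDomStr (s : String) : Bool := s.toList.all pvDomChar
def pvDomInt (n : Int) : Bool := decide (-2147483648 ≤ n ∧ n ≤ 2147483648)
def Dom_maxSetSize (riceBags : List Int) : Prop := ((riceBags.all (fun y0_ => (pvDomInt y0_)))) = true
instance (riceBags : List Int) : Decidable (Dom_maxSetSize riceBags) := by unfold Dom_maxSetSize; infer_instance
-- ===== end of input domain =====

-- B replaces A's per-element chain re-walk by a sort-then-DP over the distinct values (alternative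
-- decomposition, not claimed faster). Pre_ excludes lists containing 0 or 1, on which A's while
-- loop never terminates (0*0 == 0, 1*1 == 1), so A returns no value there.


-- ===== PORT A =====
-- the 'while tmp*tmp in riceSet' loop; fuel only makes it total — under Pre_ the fuel
-- riceBags.length is never exhausted (proved below), so this is A's loop step for step
def pvChainA (s : PySem.Set Int) : Nat → Int → Int → Int
  | 0, _, cnt => cnt
  | f+1, tmp, cnt => if tmp * tmp ∈ s then pvChainA s f (tmp * tmp) (cnt + 1) else cnt

def maxSetSize (riceBags : List Int) : Int :=
  let riceSet : PySem.Set Int := PySem.Set.ofList riceBags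
  riceBags.foldl (fun res bag => max (pvChainA riceSet riceBags.length bag 1) res) 0

-- ===== PORT B =====
def maxSetSize_alt (riceBags : List Int) : Int :=
  let riceSet : PySem.Set Int := PySem.Set.ofList riceBags
  let length := (PySem.List.sorted (PySem.List.dedup riceBags) (fun v => |v|) true).foldl
      (fun d v => d.insert v (if v * v ∈ riceSet then d.getD (v * v) 0 + 1 else 1))
      (PySem.Dict.empty : PySem.Dict Int Int)
  -- length[bag]: the key is always present (bag ∈ dedup riceBags), so getD is exact here
  riceBags.foldl (fun res bag => max res (length.getD bag 0)) 0

-- ===== PRECONDITION & SPEC =====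
-- Pre_ excludes exactly the inputs on which the Python A never returns (infinite while loop at 0 or 1)
def Pre_maxSetSize (riceBags : List Int) : Prop :=
  (0 : Int) ∉ riceBags ∧ (1 : Int) ∉ riceBags
instance (riceBags : List Int) : Decidable (Pre_maxSetSize riceBags) := by
  unfold Pre_maxSetSize; infer_instance
def pvWitness_maxSetSize : List Int := ([3, 16, 2, 4, -2, 256])

def Spec_maxSetSize (riceBags : List Int) (out : Int) : Prop := out = maxSetSize_alt riceBags
instance (riceBags : List Int) (out : Int) : Decidable (Spec_maxSetSize riceBags out) := by unfold Spec_maxSetSize; infer_instance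

-- ===== CLAIM (what is proved, stated in full; the proofs are below) =====
def Claim_equal_maxSetSize : Prop := ∀ (riceBags : List Int), Dom_maxSetSize riceBags → Pre_maxSetSize riceBags → Spec_maxSetSize riceBags (maxSetSize riceBags)

-- ===== LEMMAS AND PROOFS =====

-- number of elements of s strictly larger than |v| in absolute value: the chain from v
-- can make at most this many steps, and it strictly decreases along the chain
def pvM (s : List Int) (v : Int) : Nat := (s.filter (fun x => |v| < |x|)).length

-- canonical chain value: pvChainA with just enough fuel
def pvVal (s : List Int) (v : Int) : Int := pvChainA s (pvM s v) v 1

theorem pvSq_gt (s : List Int) (hs0 : (0:Int) ∉ s) (hs1 : (1:Int) ∉ s)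
    {v : Int} (h : v * v ∈ s) : |v| < v * v := by
  have h0 : v * v ≠ 0 := fun e => hs0 (e ▸ h)
  have h1 : v * v ≠ 1 := fun e => hs1 (e ▸ h)
  have h2 : 2 ≤ v * v := by have := mul_self_nonneg v; omega
  have hbb : v * v = |v| * |v| := (abs_mul_abs_self v).symm
  have hb : 0 ≤ |v| := abs_nonneg v
  by_cases hle : |v| ≤ 1
  · linarith
  · have hgt : (1:Int) < |v| := by omega
    rw [hbb] at h2 ⊢
    exact (lt_mul_iff_one_lt_left (by linarith)).mpr hgt

theorem pvFilter_len_lt {l : List Int} {p q : Int → Bool}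
    (himp : ∀ x, p x = true → q x = true) {a : Int}
    (ha : a ∈ l) (hqa : q a = true) (hpa : p a = false) :
    (l.filter p).length < (l.filter q).length := by
  induction l with
  | nil => cases ha
  | cons b t ih =>
    have hle : (t.filter p).length ≤ (t.filter q).length := by
      rw [← List.countP_eq_length_filter, ← List.countP_eq_length_filter]
      exact List.countP_mono_left (fun x _ hx => himp x hx)
    rcases List.mem_cons.mp ha with rfl | hat
    · simp only [List.filter_cons, hpa, hqa, if_false, if_true, List.length_cons, Bool.false_eq_true]
      omega
    · have hlt := ih hat
      cases hqb : q b with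
      | false =>
        have hpb : p b = false := by
          cases hpb : p b
          · rfl
          · exact absurd (himp b hpb) (by simp [hqb])
        simp only [List.filter_cons, hpb, hqb, Bool.false_eq_true, ite_false]
        exact hlt
      | true =>
        cases hpb : p b <;>
          simp only [List.filter_cons, hpb, hqb, Bool.false_eq_true, ite_false, ite_true,
            List.length_cons] <;> omega

theorem pvM_sq_lt (s : List Int) (hs0 : (0:Int) ∉ s) (hs1 : (1:Int) ∉ s)
    {v : Int} (h : v * v ∈ s) : pvM s (v * v) < pvM s v := by
  have hgt : |v| < v * v := pvSq_gt s hs0 hs1 h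
  have habs : |v * v| = v * v := abs_of_nonneg (mul_self_nonneg v)
  refine pvFilter_len_lt (a := v * v) (fun x hx => ?_) h ?_ ?_
  · simp only [decide_eq_true_eq] at hx ⊢
    calc |v| < v * v := hgt
      _ = |v * v| := habs.symm
      _ < |x| := hx
  · simp only [decide_eq_true_eq]
    omega
  · simp only [decide_eq_false_iff_not, habs]
    omega

theorem pvM_zero_stop (s : List Int) (hs0 : (0:Int) ∉ s) (hs1 : (1:Int) ∉ s)
    {v : Int} (h : pvM s v = 0) :
    ∀ (f : Nat) (c : Int), pvChainA s f v c = c := by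
  intro f c
  have hnot : v * v ∉ s := by
    intro hm
    have hgt : |v| < v * v := pvSq_gt s hs0 hs1 hm
    have hmf : v * v ∈ s.filter (fun x => |v| < |x|) := by
      refine List.mem_filter.mpr ⟨hm, ?_⟩
      simp only [decide_eq_true_eq]
      calc |v| < v * v := hgt
        _ = |v * v| := (abs_of_nonneg (mul_self_nonneg v)).symm
    rw [pvM, List.length_eq_zero_iff] at h
    rw [h] at hmf
    cases hmf
  cases f <;> simp [pvChainA, hnot]

theorem pvChainA_shift (s : List Int) :
    ∀ (f : Nat) (v c d : Int), pvChainA s f v (c + d) = pvChainA s f v c + d := by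
  intro f
  induction f with
  | zero => intro v c d; simp [pvChainA]
  | succ f ih =>
    intro v c d
    by_cases h : v * v ∈ s <;> simp only [pvChainA, h, if_true, if_false]
    rw [show c + d + 1 = (c + 1) + d by ring, ih]

theorem pvChainA_stable (s : List Int) (hs0 : (0:Int) ∉ s) (hs1 : (1:Int) ∉ s) :
    ∀ (f : Nat), ∀ (v c : Int) (f' : Nat), pvM s v ≤ f → pvM s v ≤ f' →
      pvChainA s f v c = pvChainA s f' v c := by
  intro f
  induction f with
  | zero =>
    intro v c f' hf _
    have h0 : pvM s v = 0 := Nat.le_zero.mp hf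
    rw [pvM_zero_stop s hs0 hs1 h0, pvM_zero_stop s hs0 hs1 h0]
  | succ f ih =>
    intro v c f' hf hf'
    cases f' with
    | zero =>
      have h0 : pvM s v = 0 := Nat.le_zero.mp hf'
      rw [pvM_zero_stop s hs0 hs1 h0, pvM_zero_stop s hs0 hs1 h0]
    | succ f' =>
      by_cases h : v * v ∈ s
      · have hlt : pvM s (v * v) < pvM s v := pvM_sq_lt s hs0 hs1 h
        simp only [pvChainA, if_pos h]
        exact ih (v*v) (c+1) f' (by omega) (by omega)
      · simp [pvChainA, h]

theorem pvVal_eq (s : List Int) (hs0 : (0:Int) ∉ s) (hs1 : (1:Int) ∉ s) (v : Int) :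
    pvVal s v = if v * v ∈ s then pvVal s (v * v) + 1 else 1 := by
  by_cases h : v * v ∈ s
  · have hlt : pvM s (v * v) < pvM s v := pvM_sq_lt s hs0 hs1 h
    obtain ⟨g, hg⟩ : ∃ g, pvM s v = g + 1 := ⟨pvM s v - 1, by omega⟩
    rw [pvVal, hg]
    simp only [pvChainA, if_pos h]
    rw [show (1:Int) + 1 = 1 + 1 from rfl, pvChainA_shift s g (v*v) 1 1]
    rw [pvChainA_stable s hs0 hs1 g (v*v) 1 (pvM s (v*v)) (by omega) le_rfl]
    simp [pvVal]
  · rw [pvVal]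
    cases hm : pvM s v <;> simp [pvChainA, h]

theorem pvChainA_eq_val (s : List Int) (hs0 : (0:Int) ∉ s) (hs1 : (1:Int) ∉ s)
    {v : Int} {f : Nat} (hf : pvM s v ≤ f) : pvChainA s f v 1 = pvVal s v :=
  pvChainA_stable s hs0 hs1 f v 1 (pvM s v) hf le_rfl

theorem pvM_lt_of_mem (s : List Int) {v : Int} (h : v ∈ s) : pvM s v < s.length := by
  rw [pvM, ← List.countP_eq_length_filter]
  exact List.countP_lt_length_iff.mpr ⟨v, h, by simp⟩

-- the fold invariant for B\'s dict: every processed key holds its true chain value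
theorem pvFold_inv (s : List Int) (hs0 : (0:Int) ∉ s) (hs1 : (1:Int) ∉ s) :
    ∀ (l : List Int) (d : PySem.Dict Int Int),
      l.Pairwise (fun a b => |b| ≤ |a|) →
      (∀ v ∈ l, ∀ x, x ∈ s → |v| < |x| → x ∈ d.keys ∨ x ∈ l) →
      (∀ k ∈ d.keys, d.getD k 0 = pvVal s k) →
      ∀ k, (k ∈ d.keys ∨ k ∈ l) →
        (l.foldl (fun d v => d.insert v (if v * v ∈ s then d.getD (v * v) 0 + 1 else 1)) d).getD k 0
          = pvVal s k := by
  intro l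
  induction l with
  | nil =>
    intro d _ _ hval k hk
    simp only [List.foldl_nil]
    exact hval k (by simpa using hk)
  | cons v t ih =>
    intro d hpw hcov hval k hk
    have hpw' := (List.pairwise_cons.mp hpw)
    have hins : (if v * v ∈ s then d.getD (v * v) 0 + 1 else 1) = pvVal s v := by
      rw [pvVal_eq s hs0 hs1 v]
      by_cases h : v * v ∈ s
      · simp only [if_pos h]
        have habs : |v| < |v * v| := by
          have := pvSq_gt s hs0 hs1 h
          rwa [abs_of_nonneg (mul_self_nonneg v)]
        have hc : v * v ∈ d.keys ∨ v * v ∈ v :: t := hcov v (List.mem_cons_self ..) (v*v) h habs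
        rcases hc with hkey | hmem
        · rw [hval _ hkey]
        · exfalso
          rcases List.mem_cons.mp hmem with heq | hmt
          · rw [heq] at habs; exact lt_irrefl _ habs
          · exact absurd (hpw'.1 _ hmt) (not_le.mpr habs)
      · simp [h]
    set d' := d.insert v (if v * v ∈ s then d.getD (v * v) 0 + 1 else 1) with hd'
    have hkeys' : ∀ k', k' ∈ d'.keys ↔ k' = v ∨ k' ∈ d.keys := by
      intro k'; rw [hd']; exact PySem.Dict.mem_keys_insert ..
    have hval' : ∀ k' ∈ d'.keys, d'.getD k' 0 = pvVal s k' := by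
      intro k' hk'
      rcases (hkeys' k').mp hk' with rfl | hk'd
      · rw [hd', PySem.Dict.getD_insert_self, hins]
      · by_cases hkv : k' = v
        · subst hkv; rw [hd', PySem.Dict.getD_insert_self, hins]
        · rw [hd', PySem.Dict.getD_insert, if_neg hkv]
          exact hval _ hk'd
    have hcov' : ∀ u ∈ t, ∀ x, x ∈ s → |u| < |x| → x ∈ d'.keys ∨ x ∈ t := by
      intro u hu x hxs hux
      rcases hcov u (List.mem_cons_of_mem _ hu) x hxs hux with hkey | hmem
      · exact Or.inl ((hkeys' x).mpr (Or.inr hkey))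
      · rcases List.mem_cons.mp hmem with rfl | hxt
        · exact Or.inl ((hkeys' x).mpr (Or.inl rfl))
        · exact Or.inr hxt
    simp only [List.foldl_cons]
    refine ih d' hpw'.2 hcov' hval' k ?_
    rcases hk with hkd | hkl
    · exact Or.inl ((hkeys' k).mpr (Or.inr hkd))
    · rcases List.mem_cons.mp hkl with rfl | hkt
      · exact Or.inl ((hkeys' k).mpr (Or.inl rfl))
      · exact Or.inr hkt

-- ===== VERDICT (by name: the statement is the Claim_ definition above) =====
theorem maxSetSize_spec : Claim_equal_maxSetSize := by
  intro riceBags _ hpre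
  obtain ⟨h0, h1⟩ := hpre
  unfold Spec_maxSetSize maxSetSize maxSetSize_alt
  simp only []
  set s : PySem.Set Int := PySem.Set.ofList riceBags with hs
  have hmem : ∀ x : Int, x ∈ s ↔ x ∈ riceBags := fun x => PySem.Set.mem_ofList ..
  have hs0 : (0:Int) ∉ s := fun h => h0 ((hmem 0).mp h)
  have hs1 : (1:Int) ∉ s := fun h => h1 ((hmem 1).mp h)
  have hdict := pvFold_inv s hs0 hs1
      (PySem.List.sorted (PySem.List.dedup riceBags) (fun v => |v|) true)
      PySem.Dict.empty
      (PySem.List.sorted_pairwise_rev ..)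
      (by
        intro v _ x hxs _
        right
        rw [PySem.List.mem_sorted, PySem.List.mem_dedup]
        exact (hmem x).mp hxs)
      (by intro k hk; rw [PySem.Dict.keys_empty] at hk; cases hk)
  refine PySem.List.foldl_congr_mem' _ _ _ _ ?_
  intro bag hbag acc
  have hbs : bag ∈ s := (hmem bag).mpr hbag
  have hA : pvChainA s riceBags.length bag 1 = pvVal s bag :=
    pvChainA_eq_val s hs0 hs1 (le_trans (Nat.le_of_lt (pvM_lt_of_mem s hbs))
      (PySem.Set.length_ofList_le ..))
  have hB := hdict bag (Or.inr (by
    rw [PySem.List.mem_sorted, PySem.List.mem_dedup]; exact hbag))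
  rw [hA, hB, max_comm]
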